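-- pv_equiv track=rewrite | github.com/pkch93/Algorithm | Beakjoon_Online_Judge/lineup.py | solution
-- ===== SOURCE A (Python) =====
-- def solution(numbers):
--     lineup = []
--     n = len(numbers)
--     k = 0
--     for i in range(n):
--         lineup.insert(k-numbers[i], i+1)
--         k += 1
--     return lineup
-- ===== SOURCE B (Python) =====
-- def solution(numbers):
--     n = len(numbers)
--     if n == 0:
--         return []
--
--     def build(size):
--         # leaf = [value] (0 = free slot); inner node = [freecount, left, right]
--         if size == 1:
--             return [0]
--         half = size // 2
--         return [size, build(half), build(size - half)]
--
--     def cnt(t):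
--         if len(t) == 1:
--             return 1 if t[0] == 0 else 0
--         return t[0]
--
--     def flatten(t, out):
--         if len(t) == 1:
--             out.append(t[0])
--         else:
--             flatten(t[1], out)
--             flatten(t[2], out)
--         return out
--
--     tree = build(n)
--     # process the insertions from last to first: the element inserted last sits at
--     # exactly its (clamped) insertion position; every earlier element takes the
--     # pos-th still-free slot.  The count-augmented tree finds it in O(log n).
--     for i in range(n - 1, -1, -1):
--         pos = i - numbers[i]
--         if pos < 0:                 # Python list.insert index semantics
--             pos += i
--             if pos < 0:
--                 pos = 0
--         elif pos > i:
--             pos = i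
--         t = tree
--         while len(t) == 3:          # descend to the pos-th free leaf
--             t[0] -= 1
--             lc = cnt(t[1])
--             if pos < lc:
--                 t = t[1]
--             else:
--                 pos -= lc
--                 t = t[2]
--         t[0] = i + 1
--     return flatten(tree, [])
-- ===== Notes on version B (the rewrite author's own statement) =====
-- stated objective: faster
-- what changed: Instead of repeatedly calling list.insert on a growing list (each insert shifts O(n) elements), B processes the indices from last to first and drops each value i+1 into the pos-th still-free slot of a preallocated array, locating that slot in O(log n) through a balanced tree augmented with free-slot counts, with the same clamping as Python's list.insert.
import Mathlib
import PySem

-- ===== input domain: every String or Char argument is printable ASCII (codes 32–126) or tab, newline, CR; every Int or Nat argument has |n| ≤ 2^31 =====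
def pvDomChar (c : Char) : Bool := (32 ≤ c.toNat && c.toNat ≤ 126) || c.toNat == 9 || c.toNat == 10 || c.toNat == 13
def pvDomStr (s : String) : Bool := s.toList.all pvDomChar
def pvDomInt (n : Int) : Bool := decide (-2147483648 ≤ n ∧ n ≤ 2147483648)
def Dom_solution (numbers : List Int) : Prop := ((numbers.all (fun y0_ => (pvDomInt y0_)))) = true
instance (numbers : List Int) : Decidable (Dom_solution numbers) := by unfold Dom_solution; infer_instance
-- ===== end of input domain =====

-- B replaces A's repeated list.insert into a growing list by a reverse pass that drops each
-- value into its k-th remaining free slot, found through a count-augmented balanced tree.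

-- ===== PORT A =====
-- lineup.insert(k - numbers[i], i + 1) for i in range(n), with k tracking len(lineup)
def solution (numbers : List Int) : List Int :=
  let n := numbers.length
  ((List.range n).foldl
    (fun (st : List Int × Int) (i : Nat) =>
      (PySem.List.insert st.1 (st.2 - PySem.List.pyGetD numbers (i : Int) 0) ((i : Int) + 1),
       st.2 + 1))
    ([], 0)).1

-- ===== PORT B =====
-- Source B's tree: leaf [value] (0 = free slot), inner node [freecount, left, right]
inductive PVTree where
  | leaf (v : Int)
  | node (c : Nat) (l : PVTree) (r : PVTree)
deriving DecidableEq, Repr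

-- Source B's cnt
def pvCnt : PVTree → Nat
  | .leaf v => if v = 0 then 1 else 0
  | .node c _ _ => c

-- Source B's build
def pvBuild : Nat → PVTree
  | 0 => .leaf 0          -- never reached (solution_alt guards n = 0), for totality only
  | 1 => .leaf 0
  | (k+2) => .node (k+2) (pvBuild ((k+2)/2)) (pvBuild ((k+2) - (k+2)/2))
decreasing_by all_goals omega

-- Source B's descent loop ("while len(t) == 3"): the in-place count decrement and final
-- leaf assignment become rebuilding of the visited path (same descent decisions)
def pvPlace : PVTree → Int → Int → PVTree
  | .leaf _, _, v => .leaf v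
  | .node c l r, k, v =>
    if k < (pvCnt l : Int) then .node (c - 1) (pvPlace l k v) r
    else .node (c - 1) l (pvPlace r (k - pvCnt l) v)

-- Source B's flatten (the mutable out list becomes an accumulator parameter)
def pvFlat : PVTree → List Int → List Int
  | .leaf v, out => out ++ [v]
  | .node _ l r, out => pvFlat r (pvFlat l out)

def solution_alt (numbers : List Int) : List Int :=
  let n := numbers.length
  if n = 0 then []
  else
    pvFlat
      (((List.range n).reverse).foldl
        (fun (t : PVTree) (i : Nat) =>
          let p0 := (i : Int) - PySem.List.pyGetD numbers (i : Int) 0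
          let p1 := if p0 < 0 then (if p0 + i < 0 then 0 else p0 + (i : Int))
                    else (if p0 > (i : Int) then (i : Int) else p0)
          pvPlace t p1 ((i : Int) + 1))
        (pvBuild n))
      []

-- ===== PRECONDITION & SPEC =====
def Spec_solution (numbers : List Int) (out : List Int) : Prop := out = solution_alt numbers
instance (numbers : List Int) (out : List Int) : Decidable (Spec_solution numbers out) := by unfold Spec_solution; infer_instance

-- ===== CLAIM (what is proved, stated in full; the proofs are below) =====
def Claim_equal_solution : Prop := ∀ (numbers : List Int), Dom_solution numbers → Spec_solution numbers (solution numbers)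

-- ===== LEMMAS AND PROOFS =====


def pvIns (L : List Int) (e : Nat) (v : Int) : List Int := L.take e ++ v :: L.drop e
def pvEff (m : Nat) (p : Int) : Nat := (if p < 0 then max (p + m) 0 else min p m).toNat

theorem pvInsert_eq (xs : List Int) (p : Int) (v : Int) :
    PySem.List.insert xs p v = pvIns xs (pvEff xs.length p) v := by
  simp [PySem.List.insert, PySem.List.sliceIndices, pvIns, pvEff]


theorem pvEff_le (m : Nat) (p : Int) : pvEff m p ≤ m := by
  simp only [pvEff]; split_ifs <;> omega

theorem pvClamp (i : Nat) (p0 : Int) :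
    (0 ≤ if p0 < 0 then (if p0 + i < 0 then 0 else p0 + (i:Int))
         else (if p0 > (i:Int) then (i:Int) else p0)) ∧
    ((if p0 < 0 then (if p0 + i < 0 then 0 else p0 + (i:Int))
      else (if p0 > (i:Int) then (i:Int) else p0)).toNat = pvEff i p0) ∧
    ((if p0 < 0 then (if p0 + i < 0 then 0 else p0 + (i:Int))
      else (if p0 > (i:Int) then (i:Int) else p0)) ≤ (i:Int)) := by
  simp only [pvEff]; split_ifs <;> omega

theorem pvIns_zero (L : List Int) (v : Int) : pvIns L 0 v = v :: L := rfl

theorem pvIns_succ (x : Int) (L : List Int) (k : Nat) (v : Int) :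
    pvIns (x :: L) (k+1) v = x :: pvIns L k v := rfl

theorem pvIns_length (L : List Int) (e : Nat) (v : Int) (h : e ≤ L.length) :
    (pvIns L e v).length = L.length + 1 := by
  simp only [pvIns, List.length_append, List.length_cons, List.length_take, List.length_drop]
  omega

def pvSfl : List Int → Nat → Int → List Int
  | [], _, _ => []
  | c :: t, k, v =>
    if c = 0 then (match k with | 0 => v :: t | k+1 => c :: pvSfl t k v)
    else c :: pvSfl t k v

def pvFill : List Int → List Int → List Int
  | [], _ => []
  | c :: t, xs =>
    if c = 0 then (match xs with | [] => pvFill t [] | x :: xs' => x :: pvFill t xs')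
    else c :: pvFill t xs

def pvZeros (s : List Int) : Nat := s.count 0

theorem pvFill_sfl (s : List Int) (e : Nat) (v : Int) (L : List Int)
    (hv : v ≠ 0) (he : e ≤ L.length) :
    pvFill (pvSfl s e v) L = pvFill s (pvIns L e v) := by
  induction s generalizing e L with
  | nil => simp [pvSfl, pvFill]
  | cons c t ih =>
    by_cases hc : c = 0
    · subst hc
      cases e with
      | zero => simp [pvSfl, pvFill, pvIns_zero, hv]
      | succ k =>
        cases L with
        | nil => simp at he
        | cons x L' =>
          simp only [pvSfl, pvIns_succ, pvFill]
          exact congrArg (x :: ·) (ih k L' (by simpa using he))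
    · simp only [pvSfl, pvFill, if_neg hc]
      exact congrArg (c :: ·) (ih e L he)

theorem pvSfl_append (a b : List Int) (k : Nat) (v : Int) :
    pvSfl (a ++ b) k v =
      if k < pvZeros a then pvSfl a k v ++ b else a ++ pvSfl b (k - pvZeros a) v := by
  induction a generalizing k with
  | nil => simp [pvZeros]
  | cons c t ih =>
    by_cases hc : c = 0
    · subst hc
      cases k with
      | zero => simp [pvSfl, pvZeros]
      | succ k' =>
        simp only [List.cons_append, pvSfl, ih k']
        have hz : pvZeros (0 :: t) = pvZeros t + 1 := by simp [pvZeros]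
        rw [hz]
        by_cases h : k' < pvZeros t
        · simp [h, Nat.succ_lt_succ h]
        · simp [h]
    · have hz : pvZeros (c :: t) = pvZeros t := by simp [pvZeros, hc]
      simp only [List.cons_append, pvSfl, if_neg hc, ih k, hz]
      split_ifs <;> simp

theorem pvZeros_sfl (s : List Int) (k : Nat) (v : Int) (hv : v ≠ 0)
    (h : k < pvZeros s) : pvZeros (pvSfl s k v) = pvZeros s - 1 := by
  induction s generalizing k with
  | nil => simp [pvZeros] at h
  | cons c t ih =>
    by_cases hc : c = 0
    · subst hc
      cases k with
      | zero => simp [pvSfl, pvZeros, hv]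
      | succ k' =>
        have hz : pvZeros (0 :: t) = pvZeros t + 1 := by simp [pvZeros]
        have h' : k' < pvZeros t := by omega
        have e1 : pvSfl ((0:Int) :: t) (k'+1) v = 0 :: pvSfl t k' v := by simp [pvSfl]
        have e2 : pvZeros (0 :: pvSfl t k' v) = pvZeros (pvSfl t k' v) + 1 := by simp [pvZeros]
        rw [e1, e2, ih k' h', hz]; omega
    · have hz : pvZeros (c :: t) = pvZeros t := by simp [pvZeros, hc]
      have h' : k < pvZeros t := by omega
      simp only [pvSfl, if_neg hc]
      have : pvZeros (c :: pvSfl t k v) = pvZeros (pvSfl t k v) := by simp [pvZeros, hc]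
      rw [this, ih k h', hz]

theorem pvFill_replicate (n : Nat) (L : List Int) (h : L.length = n) :
    pvFill (List.replicate n 0) L = L := by
  induction n generalizing L with
  | zero => cases L <;> simp_all [pvFill]
  | succ m ih =>
    cases L with
    | nil => simp at h
    | cons x L' =>
      simp only [List.replicate_succ, pvFill]
      exact congrArg (x :: ·) (ih L' (by simpa using h))

theorem pvFill_nil (s : List Int) (h : pvZeros s = 0) : pvFill s [] = s := by
  induction s with
  | nil => rfl
  | cons c t ih =>
    have hc : c ≠ 0 := by
      intro hc; subst hc; simp [pvZeros] at h
    have ht : pvZeros t = 0 := by simpa [pvZeros, hc] using h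
    simp [pvFill, hc, ih ht]

def pvToList : PVTree → List Int
  | .leaf v => [v]
  | .node _ l r => pvToList l ++ pvToList r

def pvInv : PVTree → Prop
  | .leaf _ => True
  | .node c l r => c = pvZeros (pvToList l) + pvZeros (pvToList r) ∧ pvInv l ∧ pvInv r

theorem pvFlat_eq (t : PVTree) (out : List Int) : pvFlat t out = out ++ pvToList t := by
  induction t generalizing out with
  | leaf v => simp [pvFlat, pvToList]
  | node c l r ihl ihr => simp [pvFlat, pvToList, ihl, ihr]

theorem pvCnt_eq (t : PVTree) (h : pvInv t) : pvCnt t = pvZeros (pvToList t) := by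
  induction t with
  | leaf v => by_cases hv : v = 0 <;> simp [pvCnt, pvToList, pvZeros, hv]
  | node c l r ihl ihr =>
    obtain ⟨hc, hl, hr⟩ := h
    simp [pvCnt, pvToList, pvZeros, hc]

theorem pvPlace_spec (t : PVTree) (k : Int) (v : Int) (ht : pvInv t)
    (hk0 : 0 ≤ k) (hk : k < (pvCnt t : Int)) (hv : v ≠ 0) :
    pvToList (pvPlace t k v) = pvSfl (pvToList t) k.toNat v ∧ pvInv (pvPlace t k v) := by
  induction t generalizing k with
  | leaf v0 =>
    have hv0 : v0 = 0 := by
      by_contra h0; simp [pvCnt, h0] at hk; omega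
    have hk' : k = 0 := by
      subst hv0; simp [pvCnt] at hk; omega
    subst hv0; subst hk'
    constructor
    · simp [pvPlace, pvToList, pvSfl]
    · simp [pvPlace, pvInv]
  | node c l r ihl ihr =>
    obtain ⟨hc, hl, hr⟩ := ht
    have hzl : pvCnt l = pvZeros (pvToList l) := pvCnt_eq l hl
    have hzr : pvCnt r = pvZeros (pvToList r) := pvCnt_eq r hr
    have hkc : k < (c : Int) := by simpa [pvCnt] using hk
    by_cases hlt : k < (pvCnt l : Int)
    · obtain ⟨e1, e2⟩ := ihl k hl hk0 hlt
      constructor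
      · simp only [pvPlace, if_pos hlt, pvToList, e1, pvSfl_append]
        rw [if_pos (by omega)]
      · simp only [pvPlace, if_pos hlt, pvInv]
        refine ⟨?_, e2, hr⟩
        have := pvZeros_sfl (pvToList l) k.toNat v hv (by omega)
        rw [e1, this]; omega
    · have hk0' : (0:Int) ≤ k - pvCnt l := by omega
      have hkr : k - pvCnt l < (pvCnt r : Int) := by omega
      obtain ⟨e1, e2⟩ := ihr (k - pvCnt l) hr hk0' hkr
      constructor
      · simp only [pvPlace, if_neg hlt, pvToList, e1, pvSfl_append]
        rw [if_neg (by omega)]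
        congr 1
        congr 1
        omega
      · simp only [pvPlace, if_neg hlt, pvInv]
        refine ⟨?_, hl, e2⟩
        have := pvZeros_sfl (pvToList r) (k - pvCnt l).toNat v hv (by omega)
        rw [e1, this]; omega

theorem pvBuild_toList (n : Nat) :
    pvToList (pvBuild n) = List.replicate (max n 1) 0 ∧ pvInv (pvBuild n) := by
  induction n using pvBuild.induct with
  | case1 => simp [pvBuild, pvToList, pvInv]
  | case2 => simp [pvBuild, pvToList, pvInv]
  | case3 k ih1 ih2 =>
    obtain ⟨l1, l2⟩ := ih1
    obtain ⟨r1, r2⟩ := ih2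
    have h1 : max ((k+2)/2) 1 = (k+2)/2 := by omega
    have h2 : max ((k+2) - (k+2)/2) 1 = (k+2) - (k+2)/2 := by omega
    rw [h1] at l1; rw [h2] at r1
    constructor
    · show pvToList (pvBuild (k+2)) = _
      rw [pvBuild]
      simp only [pvToList, l1, r1]
      rw [← List.replicate_add]
      congr 1
      omega
    · show pvInv (pvBuild (k+2))
      rw [pvBuild]
      refine ⟨?_, l2, r2⟩
      simp only [l1, r1, pvZeros, List.count_replicate]
      simp
      omega

theorem pvCnt_build (n : Nat) : pvCnt (pvBuild n) = max n 1 := by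
  have h := (pvBuild_toList n).2
  rw [pvCnt_eq _ h, (pvBuild_toList n).1]
  simp [pvZeros]

def pvF (nums : List Int) : Nat → List Int
  | 0 => []
  | j+1 => pvIns (pvF nums j) (pvEff j ((j : Int) - nums.getD j 0)) ((j : Int) + 1)

theorem pvF_length (nums : List Int) (j : Nat) : (pvF nums j).length = j := by
  induction j with
  | zero => rfl
  | succ m ih =>
    rw [pvF, pvIns_length _ _ _ (by rw [ih]; exact pvEff_le m _), ih]

def pvAStep (nums : List Int) (st : List Int × Int) (i : Nat) : List Int × Int :=
  (PySem.List.insert st.1 (st.2 - PySem.List.pyGetD nums (i : Int) 0) ((i : Int) + 1), st.2 + 1)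

def pvBStep (nums : List Int) (t : PVTree) (i : Nat) : PVTree :=
  let p0 := (i : Int) - PySem.List.pyGetD nums (i : Int) 0
  let p1 := if p0 < 0 then (if p0 + i < 0 then 0 else p0 + (i : Int))
            else (if p0 > (i : Int) then (i : Int) else p0)
  pvPlace t p1 ((i : Int) + 1)

theorem pvAfold (nums : List Int) (j : Nat) :
    (List.range j).foldl (pvAStep nums) ([], 0) = (pvF nums j, (j : Int)) := by
  induction j with
  | zero => rfl
  | succ m ih =>
    rw [List.range_succ, List.foldl_append, ih]
    simp only [List.foldl_cons, List.foldl_nil, pvAStep, PySem.List.pyGetD_natCast]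
    rw [pvInsert_eq, pvF_length]
    show (pvF nums (m+1), _) = _
    constructor

theorem pvDesc (nums : List Int) (j : Nat) (t : PVTree) (ht : pvInv t) (hj : j ≤ pvCnt t) :
    pvInv (((List.range j).reverse).foldl (pvBStep nums) t)
    ∧ pvCnt (((List.range j).reverse).foldl (pvBStep nums) t) = pvCnt t - j
    ∧ pvFill (pvToList (((List.range j).reverse).foldl (pvBStep nums) t)) []
        = pvFill (pvToList t) (pvF nums j) := by
  induction j generalizing t with
  | zero =>
    simp only [List.range_zero, List.reverse_nil, List.foldl_nil]
    exact ⟨ht, by omega, rfl⟩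
  | succ m ih =>
    have hrev : (List.range (m+1)).reverse = m :: (List.range m).reverse := by
      rw [List.range_succ, List.reverse_append]; rfl
    rw [hrev]
    simp only [List.foldl_cons]
    have hstep : pvBStep nums t m =
        pvPlace t (if (m : Int) - nums.getD m 0 < 0
            then (if (m : Int) - nums.getD m 0 + m < 0 then 0 else (m : Int) - nums.getD m 0 + (m : Int))
            else (if (m : Int) - nums.getD m 0 > (m : Int) then (m : Int) else (m : Int) - nums.getD m 0))
          ((m : Int) + 1) := by
      simp only [pvBStep, PySem.List.pyGetD_natCast]
    obtain ⟨c0, c1, c2⟩ := pvClamp m ((m : Int) - nums.getD m 0)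
    set q : Int := (if (m : Int) - nums.getD m 0 < 0
            then (if (m : Int) - nums.getD m 0 + m < 0 then 0 else (m : Int) - nums.getD m 0 + (m : Int))
            else (if (m : Int) - nums.getD m 0 > (m : Int) then (m : Int) else (m : Int) - nums.getD m 0)) with hq
    have hcnt : q < (pvCnt t : Int) := by omega
    obtain ⟨e1, e2⟩ := pvPlace_spec t q ((m : Int) + 1) ht c0 hcnt (by omega)
    rw [hstep]
    have hc' : pvCnt (pvPlace t q ((m : Int) + 1)) = pvCnt t - 1 := by
      rw [pvCnt_eq _ e2, e1, pvZeros_sfl _ _ _ (by omega) (by rw [← pvCnt_eq _ ht]; omega),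
        ← pvCnt_eq _ ht]
    obtain ⟨d1, d2, d3⟩ := ih _ e2 (by omega)
    refine ⟨d1, by omega, ?_⟩
    rw [d3, e1, c1]
    rw [pvFill_sfl _ _ _ _ (by omega) (by rw [pvF_length]; exact pvEff_le m _)]
    rfl

-- assembly of the above into A = B
theorem pvMain (numbers : List Int) : solution numbers = solution_alt numbers := by
  show ((List.range numbers.length).foldl (pvAStep numbers) ([], 0)).1
      = if numbers.length = 0 then ([] : List Int)
        else pvFlat (((List.range numbers.length).reverse).foldl (pvBStep numbers)
               (pvBuild numbers.length)) []
  rw [pvAfold]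
  by_cases hn : numbers.length = 0
  · rw [if_pos hn, hn]; rfl
  · rw [if_neg hn, pvFlat_eq, List.nil_append]
    obtain ⟨hb1, hb2⟩ := pvBuild_toList numbers.length
    have hmax : max numbers.length 1 = numbers.length := by omega
    have hcb : pvCnt (pvBuild numbers.length) = numbers.length := by
      rw [pvCnt_build]; omega
    obtain ⟨d1, d2, d3⟩ := pvDesc numbers numbers.length (pvBuild numbers.length) hb2
      (by omega)
    have hz : pvZeros (pvToList (((List.range numbers.length).reverse).foldl
        (pvBStep numbers) (pvBuild numbers.length))) = 0 := by
      rw [← pvCnt_eq _ d1, d2, hcb]; omega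
    have := pvFill_nil _ hz
    rw [← this, d3, hb1, hmax,
      pvFill_replicate numbers.length _ (pvF_length numbers numbers.length)]

-- ===== VERDICT (by name: the statement is the Claim_ definition above) =====
theorem solution_spec : Claim_equal_solution := by
  intro numbers _
  unfold Spec_solution
  exact pvMain numbers
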